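-- pv_equiv track=rewrite | github.com/Mathieu-Schmerber/LemonInc.Packages | publish.py | dashed_to_pascal
-- ===== SOURCE A (Python) =====
-- def dashed_to_pascal(dashed_case):
--     pascal_case = ""
--     capitalize_next = True
--     for char in dashed_case:
--         if char == "-":
--             capitalize_next = True
--         else:
--             if capitalize_next:
--                 pascal_case += char.upper()
--                 capitalize_next = False
--             else:
--                 pascal_case += char
--     return pascal_case
-- ===== SOURCE B (Python) =====
-- def dashed_to_pascal(dashed_case):
--     return "".join(w[:1].upper() + w[1:] for w in dashed_case.split('-'))
-- ===== Notes on version B (the rewrite author's own statement) =====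
-- stated objective: faster
-- what changed: Replaces the char-by-char scan with a mutable capitalize-next flag by splitting the string on dashes and uppercasing only the first character of each segment (w[:1].upper()+w[1:], preserving the rest), joined back together.
import Mathlib
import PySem

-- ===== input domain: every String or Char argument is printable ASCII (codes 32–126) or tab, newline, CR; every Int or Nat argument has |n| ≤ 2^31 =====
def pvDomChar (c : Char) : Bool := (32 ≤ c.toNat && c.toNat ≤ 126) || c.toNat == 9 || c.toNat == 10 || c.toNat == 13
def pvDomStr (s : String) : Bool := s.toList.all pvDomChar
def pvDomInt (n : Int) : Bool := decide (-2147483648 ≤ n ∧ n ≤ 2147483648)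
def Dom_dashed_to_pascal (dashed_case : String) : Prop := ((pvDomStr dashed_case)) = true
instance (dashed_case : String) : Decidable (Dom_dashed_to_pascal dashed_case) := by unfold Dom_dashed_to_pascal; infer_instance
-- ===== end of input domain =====

-- B replaces A's char-by-char scan with a capitalize-next flag by split-on-dash,
-- uppercase each segment's first char, join (simpler decomposition, same result).


-- ===== PORT A =====
-- A's loop: accumulate pascal_case and the capitalize_next flag over the chars.
def dashedToPascalLoop (cs : List Char) (acc : List Char) (cap : Bool) : List Char :=
  match cs with
  | [] => acc
  | c :: rest =>
    if c = '-' then dashedToPascalLoop rest acc true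
    else
      if cap then dashedToPascalLoop rest (acc ++ PySem.Chars.upper [c]) false
      else dashedToPascalLoop rest (acc ++ [c]) false

def dashed_to_pascal (dashed_case : String) : String :=
  String.mk (dashedToPascalLoop dashed_case.toList [] true)

-- ===== PORT B =====
-- B: split on '-', uppercase w[:1] of each segment, keep w[1:], join with "".
def dashed_to_pascal_alt (dashed_case : String) : String :=
  String.mk (PySem.Chars.join []
    ((PySem.Chars.splitOn dashed_case.toList ['-']).map
      (fun w => PySem.Chars.upper (PySem.List.slice w none (some 1)) ++
                PySem.List.slice w (some 1) none)))

-- ===== PRECONDITION & SPEC =====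
def Spec_dashed_to_pascal (dashed_case : String) (out : String) : Prop := out = dashed_to_pascal_alt dashed_case
instance (dashed_case : String) (out : String) : Decidable (Spec_dashed_to_pascal dashed_case out) := by unfold Spec_dashed_to_pascal; infer_instance

-- ===== CLAIM (what is proved, stated in full; the proofs are below) =====
def Claim_equal_dashed_to_pascal : Prop := ∀ (dashed_case : String), Dom_dashed_to_pascal dashed_case → Spec_dashed_to_pascal dashed_case (dashed_to_pascal dashed_case)

-- ===== LEMMAS AND PROOFS =====

-- a pure (no-accumulator) version of A's loop
def dtpPure (cs : List Char) (cap : Bool) : List Char :=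
  match cs with
  | [] => []
  | c :: rest =>
    if c = '-' then dtpPure rest true
    else (if cap then [PySem.Chars.upperChar c] else [c]) ++ dtpPure rest false

-- dash-split of a char list (head-growing structural version)
def consHead (p : List Char) : List (List Char) → List (List Char)
  | [] => [p]
  | w :: ws => (p ++ w) :: ws

def splitD : List Char → List (List Char)
  | [] => [[]]
  | c :: rest => if c = '-' then [] :: splitD rest else consHead [c] (splitD rest)

lemma splitD_ne_nil (cs : List Char) : splitD cs ≠ [] := by
  cases cs with
  | nil => simp [splitD]
  | cons c rest =>
    simp only [splitD]
    split
    · simp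
    · cases h : splitD rest <;> simp [consHead]

lemma consHead_consHead (a b : List Char) (ws : List (List Char)) (h : ws ≠ []) :
    consHead a (consHead b ws) = consHead (a ++ b) ws := by
  cases ws with
  | nil => exact absurd rfl h
  | cons w ws' => simp [consHead]

lemma loop_acc (cs : List Char) (acc : List Char) (cap : Bool) :
    dashedToPascalLoop cs acc cap = acc ++ dtpPure cs cap := by
  induction cs generalizing acc cap with
  | nil => simp [dashedToPascalLoop, dtpPure]
  | cons c rest ih =>
    simp only [dashedToPascalLoop, dtpPure]
    split
    · exact ih acc true
    · split <;> simp [ih, PySem.Chars.upper]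

lemma go_eq (fuel : Nat) (l cur : List Char) (acc : List (List Char)) (h : l.length < fuel) :
    PySem.Chars.splitOn.go ['-'] fuel l cur acc =
      acc.reverse ++ consHead cur.reverse (splitD l) := by
  induction fuel generalizing l cur acc with
  | zero => omega
  | succ fuel ih =>
    cases l with
    | nil => simp [PySem.Chars.splitOn.go, splitD, consHead]
    | cons c rest =>
      simp only [PySem.Chars.splitOn.go]
      by_cases hc : c = '-'
      · have hp : List.isPrefixOf ['-'] (c :: rest) = true := by
          simp [List.isPrefixOf, hc]
        rw [if_pos hp]
        have hgo := ih rest [] (cur.reverse :: acc) (by simp at h ⊢; omega)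
        simp only [List.length_nil, List.length_cons, List.drop_succ_cons, List.drop_zero]
        rw [hgo]
        have hs : splitD (c :: rest) = [] :: splitD rest := by simp [splitD, hc]
        rw [hs]
        cases hr : splitD rest with
        | nil => exact absurd hr (splitD_ne_nil rest)
        | cons w ws => simp [consHead]
      · have hp : List.isPrefixOf ['-'] (c :: rest) = false := by
          simp [List.isPrefixOf]
          exact fun hcc => absurd hcc.symm hc
        rw [if_neg (by simp [hp])]
        have := ih rest (c :: cur) acc (by simp at h ⊢; omega)
        rw [this]
        have hs : splitD (c :: rest) = consHead [c] (splitD rest) := by simp [splitD, hc]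
        rw [hs, consHead_consHead _ _ _ (splitD_ne_nil rest)]
        simp

lemma splitOn_eq_splitD (cs : List Char) :
    PySem.Chars.splitOn cs ['-'] = splitD cs := by
  rw [PySem.Chars.splitOn, go_eq (cs.length + 1) cs [] [] (by omega)]
  cases h : splitD cs with
  | nil => exact absurd h (splitD_ne_nil cs)
  | cons w ws => simp [consHead]

-- word transform from B
def pvF (w : List Char) : List Char :=
  PySem.Chars.upper (PySem.List.slice w none (some 1)) ++ PySem.List.slice w (some 1) none

lemma pvF_nil : pvF [] = [] := by decide

lemma pvF_cons (c : Char) (w : List Char) : pvF (c :: w) = PySem.Chars.upperChar c :: w := by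
  simp [pvF, PySem.List.slice, PySem.Chars.upper]

lemma join_nil_cons (w : List Char) (ws : List (List Char)) :
    PySem.Chars.join [] (w :: ws) = w ++ PySem.Chars.join [] ws := by
  cases ws with
  | nil => simp [PySem.Chars.join, List.intercalate]
  | cons v vs => simp [PySem.Chars.join, List.intercalate, List.intersperse]

lemma dtpPure_eq (cs : List Char) :
    dtpPure cs true = PySem.Chars.join [] ((splitD cs).map pvF) ∧
    dtpPure cs false = (splitD cs).headI ++ PySem.Chars.join [] ((splitD cs).tail.map pvF) := by
  induction cs with
  | nil => simp [dtpPure, splitD, pvF_nil, PySem.Chars.join, List.intercalate]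
  | cons c rest ih =>
    by_cases hc : c = '-'
    · subst hc
      have hs : splitD ('-' :: rest) = [] :: splitD rest := by simp [splitD]
      constructor
      · rw [hs]; simp only [List.map_cons, join_nil_cons, pvF_nil, List.nil_append]
        simpa [dtpPure] using ih.1
      · rw [hs]; simp only [List.headI, List.tail, List.nil_append]
        simpa [dtpPure] using ih.1
    · cases hr : splitD rest with
      | nil => exact absurd hr (splitD_ne_nil rest)
      | cons w ws =>
        have hs : splitD (c :: rest) = (c :: w) :: ws := by
          simp [splitD, hc, hr, consHead]
        have ih2 := ih.2
        rw [hr] at ih2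
        simp only [List.headI, List.tail] at ih2
        constructor
        · rw [hs]; simp only [List.map_cons, join_nil_cons, pvF_cons]
          simp [dtpPure, hc, ih2]
        · rw [hs]; simp only [List.headI, List.tail]
          simp [dtpPure, hc, ih2]

-- ===== VERDICT (by name: the statement is the Claim_ definition above) =====
theorem dashed_to_pascal_spec : Claim_equal_dashed_to_pascal := by
  intro s _
  unfold Spec_dashed_to_pascal dashed_to_pascal dashed_to_pascal_alt
  rw [loop_acc, splitOn_eq_splitD]
  simp only [List.nil_append]
  rw [(dtpPure_eq s.toList).1]
  rfl
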